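-- pv_equiv track=rewrite | github.com/karistin/HTTP_SERVER_RFC1945 | parser.py | is_HTTP_Version
-- ===== SOURCE A (Python) =====
-- def is_digit(octet):
--     if len(octet) > 1:
--         return False
--     return 48 <= ord(octet) < 58
--
-- def is_HTTP_Version(octet):
--     if octet[0:5] != "HTTP/":
--         return False
--     if octet.count(".") > 1:
--         return False
--     if octet.find(".") == 5:
--         return False
--     for i in range(5, octet.find(".")):
--         if is_digit(octet[i]) == False:
--             return False
--     for i in range(octet.find(".")+1,  len(octet)):
--         if is_digit(octet[i]) == False:
--             return False
--     return True
-- ===== SOURCE B (Python) =====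
-- def is_HTTP_Version(octet):
--     if octet[0:5] != "HTTP/":
--         return False
--     rest = octet[5:]
--     if rest.count(".") != 1:
--         return False
--     major, minor = rest.split(".")
--     if major == "":
--         return False
--     return all("0" <= c <= "9" for c in major) and all("0" <= c <= "9" for c in minor)
-- ===== Notes on version B (the rewrite author's own statement) =====
-- stated objective: simpler
-- what changed: Replaces A's find()-driven index loops over the whole string (with a per-character is_digit helper that re-checks length and calls ord) by a direct decomposition: take rest = octet[5:], require exactly one dot, split rest into major/minor and check both are ASCII-digit strings (major non-empty).
import Mathlib
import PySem

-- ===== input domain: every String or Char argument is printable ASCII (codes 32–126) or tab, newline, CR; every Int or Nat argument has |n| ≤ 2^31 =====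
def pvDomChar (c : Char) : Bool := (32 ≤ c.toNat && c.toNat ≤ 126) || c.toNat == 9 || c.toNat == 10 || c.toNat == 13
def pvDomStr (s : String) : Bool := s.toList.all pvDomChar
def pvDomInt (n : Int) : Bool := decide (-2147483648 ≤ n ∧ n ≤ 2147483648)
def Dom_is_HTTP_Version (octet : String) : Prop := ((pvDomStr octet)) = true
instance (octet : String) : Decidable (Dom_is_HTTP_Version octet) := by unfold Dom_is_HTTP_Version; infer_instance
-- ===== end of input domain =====

-- B replaces A's find()-driven index loops by a split-based decomposition of the version string (simpler); equal on all inputs.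


-- ===== PORT A =====
-- octet[i] for an index: the one-character string (A only indexes in range; "" = IndexError, never reached by A's loops)
def pyCharAt (s : String) (i : Int) : String :=
  match PySem.Str.pyGet? s i with
  | some c => String.ofList [c]
  | none => ""

-- helper is_digit: ord(octet) on a non-1-char string raises in Python (unreachable: A passes octet[i]); the port returns false there
def is_digit (octet : String) : Bool :=
  if PySem.Str.len octet > 1 then false
  else match octet.toList with
       | [c] => decide (48 ≤ c.toNat ∧ c.toNat < 58)
       | _ => false

def is_HTTP_Version (octet : String) : Bool :=
  if PySem.Str.slice octet (some 0) (some 5) ≠ "HTTP/" then false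
  else if PySem.Str.count octet "." > 1 then false
  else if PySem.Str.find octet "." = 5 then false
  else if ¬ ((PySem.List.pyRange 5 (PySem.Str.find octet ".") 1).all
              (fun i => is_digit (pyCharAt octet i))) then false
  else if ¬ ((PySem.List.pyRange (PySem.Str.find octet "." + 1) (PySem.Str.len octet) 1).all
              (fun i => is_digit (pyCharAt octet i))) then false
  else true

-- ===== PORT B =====
def isDigitChar (c : Char) : Bool := decide ('0' ≤ c ∧ c ≤ '9')

def is_HTTP_Version_alt (octet : String) : Bool :=
  if PySem.Str.slice octet (some 0) (some 5) ≠ "HTTP/" then false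
  else
    let rest := PySem.Str.slice octet (some 5) none
    if PySem.Str.count rest "." ≠ 1 then false
    else match PySem.Str.split? rest "." with
      | some [major, minor] =>
        if major = "" then false
        else major.toList.all isDigitChar && minor.toList.all isDigitChar
      | _ => false   -- unreachable: sep ≠ "" and count = 1 give exactly two parts (Python would raise on unpack)

-- ===== PRECONDITION & SPEC =====
def Spec_is_HTTP_Version (octet : String) (out : Bool) : Prop := out = is_HTTP_Version_alt octet
instance (octet : String) (out : Bool) : Decidable (Spec_is_HTTP_Version octet out) := by unfold Spec_is_HTTP_Version; infer_instance

-- ===== CLAIM (what is proved, stated in full; the proofs are below) =====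
def Claim_equal_is_HTTP_Version : Prop := ∀ (octet : String), Dom_is_HTTP_Version octet → Spec_is_HTTP_Version octet (is_HTTP_Version octet)

-- ===== LEMMAS AND PROOFS =====

-- Chars.count with a single-character needle is List.count
theorem countgo_singleton (c : Char) : ∀ (l : List Char) (fuel acc : Nat),
    l.length ≤ fuel → PySem.Chars.count.go [c] fuel l acc = acc + l.count c := by
  intro l
  induction l with
  | nil => intro fuel acc h; cases fuel <;> simp [PySem.Chars.count.go]
  | cons h t ih =>
    intro fuel acc hb
    simp only [List.length_cons] at hb
    cases fuel with
    | zero => omega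
    | succ f =>
      simp only [PySem.Chars.count.go, List.count_cons]
      by_cases hch : c = h
      · subst hch
        rw [if_pos (by simp [List.isPrefixOf])]
        rw [show List.drop [c].length (c :: t) = t by simp]
        rw [ih f (acc + 1) (by omega)]
        simp
        omega
      · rw [if_neg (by simp [List.isPrefixOf, hch])]
        rw [ih f acc (by omega)]
        have : (h == c) = false := by simp [Ne.symm hch]
        rw [this]
        simp

theorem count_singleton (l : List Char) (c : Char) :
    PySem.Chars.count l [c] = l.count c := by
  simp [PySem.Chars.count]
  rw [countgo_singleton c l l.length 0 le_rfl]
  simp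

-- first-occurrence decomposition from count = 1
theorem count_one_split {l : List Char} {c : Char} (h : l.count c = 1) :
    ∃ u v, l = u ++ c :: v ∧ c ∉ u ∧ c ∉ v := by
  induction l with
  | nil => simp at h
  | cons a t ih =>
    by_cases hac : c = a
    · subst hac
      refine ⟨[], t, rfl, by simp, ?_⟩
      simp at h
      exact List.count_eq_zero.mp h
    · have hac' : (a == c) = false := by simp [Ne.symm hac]
      rw [List.count_cons, hac'] at h
      simp at h
      obtain ⟨u, v, rfl, hu, hv⟩ := ih h
      exact ⟨a :: u, v, rfl, by simp [hu]; exact hac, hv⟩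

theorem find_singleton_none {l : List Char} {c : Char} (h : c ∉ l) :
    PySem.Chars.find l [c] = -1 := by
  rw [PySem.Chars.find_eq_neg_one_iff]
  intro hinf
  exact h (hinf.subset (by simp))

-- find with a singleton needle points at the first occurrence
theorem find_singleton_eq {u v : List Char} {c : Char} (hu : c ∉ u) :
    PySem.Chars.find (u ++ c :: v) [c] = (u.length : Int) := by
  have hinf : [c] <:+: (u ++ c :: v) := ⟨u, v, by simp⟩
  have h0 : 0 ≤ PySem.Chars.find (u ++ c :: v) [c] :=
    (PySem.Chars.find_nonneg_iff _ _).mpr hinf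
  obtain ⟨hpre, hmin⟩ := PySem.Chars.find_spec h0
  set n := (PySem.Chars.find (u ++ c :: v) [c]).toNat with hn
  have hne : n = u.length := by
    rcases Nat.lt_trichotomy n u.length with hlt | heq | hgt
    · exfalso
      obtain ⟨t, ht⟩ := hpre
      rw [List.drop_eq_getElem_cons (show n < (u ++ c :: v).length by simp; omega)] at ht
      have hc : (u ++ c :: v)[n]'(by simp; omega) = c := by
        have h2 := congrArg (·.head?) ht
        simp at h2
        rw [List.getElem?_eq_getElem (show n < (u ++ c :: v).length by simp; omega)] at h2
        exact Option.some.inj h2.symm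
      rw [List.getElem_append_left hlt] at hc
      exact hu (hc ▸ List.getElem_mem hlt)
    · exact heq
    · exfalso
      exact hmin u.length hgt ⟨v, by simp⟩
  omega

-- splitOn with a singleton separator absent from the remainder
theorem splitOngo_none (c : Char) : ∀ (l : List Char) (fuel : Nat) (cur : List Char) (acc : List (List Char)),
    c ∉ l → l.length ≤ fuel →
    PySem.Chars.splitOn.go [c] fuel l cur acc = acc.reverse ++ [cur.reverse ++ l] := by
  intro l
  induction l with
  | nil => intro fuel cur acc _ _; cases fuel <;> simp [PySem.Chars.splitOn.go]
  | cons h t ih =>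
    intro fuel cur acc hmem hb
    simp only [List.length_cons] at hb
    cases fuel with
    | zero => omega
    | succ f =>
      simp only [PySem.Chars.splitOn.go]
      rw [if_neg (by simp [List.isPrefixOf]; intro hc; exact hmem (by simp [hc]))]
      rw [ih f (h :: cur) acc (by simp at hmem; tauto) (by omega)]
      simp

theorem splitOngo_two (c : Char) (v : List Char) (hv : c ∉ v) :
    ∀ (u : List Char) (fuel : Nat) (cur : List Char) (acc : List (List Char)),
    c ∉ u → (u ++ c :: v).length ≤ fuel →
    PySem.Chars.splitOn.go [c] fuel (u ++ c :: v) cur acc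
      = acc.reverse ++ [cur.reverse ++ u, v] := by
  intro u
  induction u with
  | nil =>
    intro fuel cur acc _ hb
    simp only [List.nil_append, List.length_cons] at hb ⊢
    cases fuel with
    | zero => omega
    | succ f =>
      simp only [PySem.Chars.splitOn.go]
      rw [if_pos (by simp [List.isPrefixOf])]
      rw [show List.drop [c].length (c :: v) = v by simp]
      rw [splitOngo_none c v f [] (cur.reverse :: acc) hv (by omega)]
      simp
  | cons h t ih =>
    intro fuel cur acc hmem hb
    simp only [List.cons_append, List.length_cons] at hb ⊢
    cases fuel with
    | zero => omega
    | succ f =>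
      simp only [PySem.Chars.splitOn.go]
      rw [if_neg (by simp [List.isPrefixOf]; intro hc; exact hmem (by simp [hc]))]
      rw [ih f (h :: cur) acc (by simp at hmem; tauto) (by omega)]
      simp

-- splitting on the unique occurrence of the separator
theorem splitOn_one {u v : List Char} {c : Char} (hu : c ∉ u) (hv : c ∉ v) :
    PySem.Chars.splitOn (u ++ c :: v) [c] = [u, v] := by
  rw [PySem.Chars.splitOn]
  rw [splitOngo_two c v hv u _ [] [] hu (by simp)]
  simp

-- A's is_digit on a one-character string is B's per-character digit test
theorem is_digit_char (c : Char) : is_digit (String.ofList [c]) = isDigitChar c := by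
  rw [is_digit, isDigitChar]
  simp [PySem.Str.len_eq]
  congr 2
  apply propext
  rw [Char.le_def, UInt32.le_iff_toNat_le]
  show c.toNat < 58 ↔ c.toNat ≤ 57
  omega

-- A's digit loop over an index range equals B's per-character scan of the corresponding segment
theorem range_all (octet : String) (P w q : List Char) (a b : Int)
    (hsplit : octet.toList = P ++ w ++ q) (ha : a = P.length) (hb : b = (P.length : Int) + w.length) :
    (PySem.List.pyRange a b 1).all (fun i => is_digit (pyCharAt octet i)) = w.all isDigitChar := by
  subst ha hb
  have hlen : P.length + w.length ≤ octet.toList.length := by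
    rw [hsplit]; simp
  have helem : ∀ (k : Nat) (hk : k < w.length),
      is_digit (pyCharAt octet ((P.length : Int) + k)) = isDigitChar w[k] := by
    intro k hk
    have hidx : (P.length : Int) + k = ((P.length + k : Nat) : Int) := by push_cast; ring
    have hget : octet.toList[(P.length + k)]? = some w[k] := by
      rw [hsplit, List.append_assoc]
      rw [List.getElem?_append_right (by omega)]
      rw [show P.length + k - P.length = k by omega]
      rw [List.getElem?_append_left hk]
      exact List.getElem?_eq_getElem hk
    rw [pyCharAt, hidx, PySem.Str.pyGet?_natCast, hget]
    exact is_digit_char w[k]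
  rw [PySem.List.pyRange_one]
  rw [show (((P.length : Int) + w.length) - P.length).toNat = w.length by omega]
  cases hw : w.all isDigitChar
  · apply List.all_eq_false.mpr
    obtain ⟨x, hxmem, hx⟩ := List.all_eq_false.mp hw
    obtain ⟨k, hk, rfl⟩ := List.mem_iff_getElem.mp hxmem
    refine ⟨(P.length : Int) + k, List.mem_map.mpr ⟨k, List.mem_range.mpr hk, rfl⟩, ?_⟩
    rw [helem k hk]
    exact hx
  · apply List.all_eq_true.mpr
    intro x hx
    obtain ⟨k, hk, rfl⟩ := List.mem_map.mp hx
    rw [List.mem_range] at hk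
    rw [helem k hk]
    exact List.all_eq_true.mp hw _ (List.getElem_mem hk)

theorem main_eq (octet : String) : is_HTTP_Version octet = is_HTTP_Version_alt octet := by
  by_cases h5 : PySem.Str.slice octet (some 0) (some 5) = "HTTP/"
  · have hHl : "HTTP/".toList = ['H','T','T','P','/'] := by decide
    have hdotl : ".".toList = ['.'] := by decide
    have htake : octet.toList.take 5 = "HTTP/".toList := by
      have h := congrArg String.toList h5
      simp only [PySem.Str.toList_slice, PySem.Chars.slice_eq_listSlice] at h
      rw [PySem.List.slice_toNat octet.toList (by norm_num) (by norm_num)] at h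
      simpa using h
    have hdecomp : octet.toList = "HTTP/".toList ++ octet.toList.drop 5 := by
      rw [← htake]; exact (List.take_append_drop 5 _).symm
    have hlen5 : octet.toList.length = 5 + (octet.toList.drop 5).length := by
      conv_lhs => rw [hdecomp]
      rw [List.length_append, hHl]
      rfl
    have hrest : (PySem.Str.slice octet (some 5) none).toList = octet.toList.drop 5 := by
      simp only [PySem.Str.toList_slice, PySem.Chars.slice_eq_listSlice]
      rw [PySem.List.slice_from octet.toList (by norm_num)]
      rfl
    have hH0 : List.count '.' "HTTP/".toList = 0 := by rw [hHl]; decide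
    have hcountA : PySem.Str.count octet "." = (octet.toList.drop 5).count '.' := by
      rw [PySem.Str.count_eq, hdotl, count_singleton]
      conv_lhs => rw [hdecomp]
      rw [List.count_append, hH0]
      omega
    have hcountB : PySem.Str.count (PySem.Str.slice octet (some 5) none) "."
        = (octet.toList.drop 5).count '.' := by
      rw [PySem.Str.count_eq, hrest, hdotl, count_singleton]
    by_cases hc1 : (octet.toList.drop 5).count '.' = 1
    · -- exactly one dot after the prefix
      obtain ⟨u, v, hruv, hu, hv⟩ := count_one_split hc1
      have hudot : '.' ∉ "HTTP/".toList ++ u := by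
        rw [hHl]; intro hmem
        rcases List.mem_append.mp hmem with h | h
        · simp at h
        · exact hu h
      have hl : octet.toList = ("HTTP/".toList ++ u) ++ '.' :: v := by
        rw [hdecomp, hruv, ← List.append_assoc]
      have hfind : PySem.Str.find octet "." = 5 + (u.length : Int) := by
        rw [PySem.Str.find_eq, hdotl, hl, find_singleton_eq hudot]
        rw [List.length_append, hHl]
        push_cast
        norm_num
      have hsplitB : PySem.Str.split? (PySem.Str.slice octet (some 5) none) "."
          = some [String.ofList u, String.ofList v] := by
        rw [PySem.Str.split?, hrest, hdotl, hruv, PySem.Chars.split?]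
        rw [if_neg (by simp)]
        rw [splitOn_one hu hv]
        rfl
      by_cases hu0 : u = []
      · subst hu0
        have hA : is_HTTP_Version octet = false := by
          simp only [is_HTTP_Version]
          rw [if_neg (not_not_intro h5), hcountA, if_neg (by omega)]
          rw [if_pos (by rw [hfind]; norm_num)]
        have hB : is_HTTP_Version_alt octet = false := by
          simp only [is_HTTP_Version_alt]
          rw [if_neg (not_not_intro h5), hcountB, if_neg (by omega), hsplitB]
          dsimp only
          rw [if_pos (show String.ofList ([] : List Char) = "" from rfl)]
        rw [hA, hB]
      · have hul : 1 ≤ u.length := by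
          cases u with
          | nil => exact absurd rfl hu0
          | cons _ _ => simp
        have hmaj : String.ofList u ≠ "" := by
          intro h
          exact hu0 (by simpa using congrArg String.toList h)
        have hloop1 : ((PySem.List.pyRange 5 (5 + (u.length : Int)) 1).all
            (fun i => is_digit (pyCharAt octet i))) = u.all isDigitChar := by
          refine range_all octet "HTTP/".toList u ('.' :: v) 5 (5 + (u.length : Int)) hl ?_ ?_
          · rw [hHl]; decide
          · rw [hHl]; norm_num
        have hloop2 : ((PySem.List.pyRange (5 + (u.length : Int) + 1) ((octet.toList.length : Int)) 1).all
            (fun i => is_digit (pyCharAt octet i))) = v.all isDigitChar := by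
          refine range_all octet (("HTTP/".toList ++ u) ++ ['.']) v [] (5 + (u.length : Int) + 1)
            ((octet.toList.length : Int)) ?_ ?_ ?_
          · rw [hl]; simp
          · rw [List.length_append, List.length_append, hHl]
            push_cast
            norm_num
          · rw [hl, List.length_append, List.length_append, List.length_append, hHl]
            push_cast
            norm_num
            omega
        have hA : is_HTTP_Version octet = (u.all isDigitChar && v.all isDigitChar) := by
          simp only [is_HTTP_Version]
          rw [if_neg (not_not_intro h5), hcountA, if_neg (by omega), hfind, PySem.Str.len_eq]
          rw [if_neg (by omega)]
          rw [hloop1, hloop2]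
          cases hua : u.all isDigitChar <;> cases hva : v.all isDigitChar <;> simp
        have hB : is_HTTP_Version_alt octet = (u.all isDigitChar && v.all isDigitChar) := by
          simp only [is_HTTP_Version_alt]
          rw [if_neg (not_not_intro h5), hcountB, if_neg (by omega), hsplitB]
          dsimp only
          rw [if_neg hmaj]
          simp only [String.toList_ofList]
        rw [hA, hB]
    · -- zero dots or more than one dot after the prefix: both reject
      have hB : is_HTTP_Version_alt octet = false := by
        simp only [is_HTTP_Version_alt]
        rw [if_neg (not_not_intro h5), hcountB, if_pos hc1]
      by_cases hgt : (octet.toList.drop 5).count '.' > 1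
      · have hA : is_HTTP_Version octet = false := by
          simp only [is_HTTP_Version]
          rw [if_neg (not_not_intro h5), hcountA, if_pos hgt]
        rw [hA, hB]
      · have hc0 : (octet.toList.drop 5).count '.' = 0 := by omega
        have hnot : '.' ∉ octet.toList := by
          intro hmem
          have hpos : 0 < octet.toList.count '.' := List.count_pos_iff.mpr hmem
          rw [hdecomp, List.count_append, hH0, hc0] at hpos
          omega
        have hfind : PySem.Str.find octet "." = -1 := by
          rw [PySem.Str.find_eq, hdotl]
          exact find_singleton_none hnot
        have hall2 : ((PySem.List.pyRange (-1 + 1) ((octet.toList.length : Int)) 1).all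
            (fun i => is_digit (pyCharAt octet i))) = false := by
          rw [show (-1 + 1 : Int) = ((0 : Nat) : Int) by norm_num]
          apply List.all_eq_false.mpr
          refine ⟨((0 : Nat) : Int), PySem.List.mem_pyRange_one.mpr (by constructor <;> omega), ?_⟩
          show ¬ is_digit (pyCharAt octet ((0 : Nat) : Int)) = true
          have hget : octet.toList[(0 : Nat)]? = some 'H' := by
            rw [hdecomp, hHl]
            rfl
          rw [pyCharAt, PySem.Str.pyGet?_natCast, hget]
          rw [is_digit_char]
          decide
        have hA : is_HTTP_Version octet = false := by
          simp only [is_HTTP_Version]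
          rw [if_neg (not_not_intro h5), hcountA, if_neg hgt, hfind, PySem.Str.len_eq]
          rw [if_neg (by norm_num)]
          rw [PySem.List.pyRange_one_eq_nil (by norm_num)]
          rw [if_neg (by simp)]
          rw [hall2]
          simp
        rw [hA, hB]
  · have hA : is_HTTP_Version octet = false := by
      simp only [is_HTTP_Version]
      rw [if_pos h5]
    have hB : is_HTTP_Version_alt octet = false := by
      simp only [is_HTTP_Version_alt]
      rw [if_pos h5]
    rw [hA, hB]

-- ===== VERDICT (by name: the statement is the Claim_ definition above) =====
theorem is_HTTP_Version_spec : Claim_equal_is_HTTP_Version := by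
  intro octet _
  unfold Spec_is_HTTP_Version
  exact main_eq octet
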